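-- pv_equiv track=rewrite | github.com/andrewhead/scholarphi-definition-detector | heuristic_filters.py | common_filters
-- ===== SOURCE A (Python) =====
-- from collections import Counter
-- from typing import Any, Dict, List, Optional, Tuple
--
-- def common_filters(
--     intent_preds: List[int],
--     slot_preds: List[List[str]]
-- ) -> Tuple[List[int], List[List[str]]]:
--     """
--     Apply common filters for the predictions
--     """
--     new_intent_preds, new_slot_preds = [], []
--
--     for intent_pred, slot_pred, in zip(intent_preds, slot_preds):
--         new_slot_pred = slot_pred
--         new_intent_pred = intent_pred
--
--         # 1. [slot] Filter out term / definition only cases.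
--         pred_counter = dict(Counter(slot_pred))
--         term_exist, def_exist = False, False
--         for c in pred_counter:
--             if c.endswith("TERM"):
--                 term_exist = True
--             if c.endswith("DEF"):
--                 def_exist = True
--         if not (term_exist and def_exist):
--             new_slot_pred = ["O" for p in slot_pred]
--
--         # 2. [intent] Change intent label if no term + def detected.
--         if not(term_exist and def_exist):
--             new_intent_pred = 0
--
--         # 3. [slot] Replace UNK with O.
--         new_slot_pred = ["O" if sp == "UNK" else sp for sp in new_slot_pred]
--
--         # 4. Change I-TERM I-DEF starting cases.
--         temp_new_slot_pred = new_slot_pred.copy()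
--         term_start, def_start = False, False
--         for sid, sp in enumerate(temp_new_slot_pred):
--             if not term_start and sp == "I-TERM":
--                 new_slot_pred[sid] = "B-TERM"
--             if sp.endswith("TERM"):
--                 term_start = True
--             else:
--                 term_start = False
--
--             if not def_start and sp == "I-DEF":
--                 new_slot_pred[sid] = "B-DEF"
--             if sp.endswith("DEF"):
--                 def_start = True
--             else:
--                 def_start = False
--
--         new_intent_preds.append(new_intent_pred)
--         new_slot_preds.append(new_slot_pred)
--
--     return new_intent_preds, new_slot_preds
-- ===== SOURCE B (Python) =====
-- def common_filters(intent_preds, slot_preds):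
--     """Run decomposition: split each cleaned sequence into maximal same-category
--     runs (TERM / DEF / other); only a run's first token can need the I->B repair,
--     and the category keys themselves give the term/def existence test."""
--     new_intent_preds, new_slot_preds = [], []
--     for intent_pred, slot_pred in zip(intent_preds, slot_preds):
--         cleaned = ['O' if sp == 'UNK' else sp for sp in slot_pred]
--         runs = []
--         for sp in cleaned:
--             k = _category(sp)
--             if runs and runs[-1][0] == k:
--                 runs[-1][1].append(sp)
--             else:
--                 runs.append((k, [sp]))
--         keys = {k for k, _ in runs}
--         if 'T' in keys and 'D' in keys:
--             out = []
--             for k, g in runs: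
--                 if k == 'T' and g[0] == 'I-TERM':
--                     g[0] = 'B-TERM'
--                 elif k == 'D' and g[0] == 'I-DEF':
--                     g[0] = 'B-DEF'
--                 out.extend(g)
--             new_intent_preds.append(intent_pred)
--             new_slot_preds.append(out)
--         else:
--             new_intent_preds.append(0)
--             new_slot_preds.append(['O'] * len(slot_pred))
--     return new_intent_preds, new_slot_preds
--
-- def _category(sp):
--     if sp.endswith('TERM'):
--         return 'T'
--     if sp.endswith('DEF'):
--         return 'D'
--     return 'O'
-- ===== Notes on version B (the rewrite author's own statement) =====
-- stated objective: alternative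
-- what changed: B replaces A's Counter scan, boolean run-trackers and index-mutating repair loop by a run decomposition: each cleaned sequence is split into maximal same-category (TERM/DEF/other) runs, term/def existence is read off the set of run keys, and only each run's first token is patched from I- to B-.
import Mathlib
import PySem

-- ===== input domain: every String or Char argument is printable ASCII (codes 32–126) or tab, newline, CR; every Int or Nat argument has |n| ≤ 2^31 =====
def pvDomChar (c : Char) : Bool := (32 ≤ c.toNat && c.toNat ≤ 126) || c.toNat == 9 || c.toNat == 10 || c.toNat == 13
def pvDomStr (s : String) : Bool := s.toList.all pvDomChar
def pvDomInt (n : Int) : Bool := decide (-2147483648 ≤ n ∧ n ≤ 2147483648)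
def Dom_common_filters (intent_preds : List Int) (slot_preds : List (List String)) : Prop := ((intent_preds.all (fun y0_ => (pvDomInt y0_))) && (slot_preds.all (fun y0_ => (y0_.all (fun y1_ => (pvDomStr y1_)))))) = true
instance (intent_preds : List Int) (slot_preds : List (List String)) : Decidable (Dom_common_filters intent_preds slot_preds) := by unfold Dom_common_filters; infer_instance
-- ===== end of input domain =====

-- B replaces A's Counter scan, boolean run-trackers and index-mutating repair loop by a run
-- decomposition of each cleaned sequence into maximal same-category runs (alternative decomposition).

-- ===== PORT A =====
-- the body of A's step-4 enumerate loop (updates new_slot_pred in place, tracks term_start/def_start)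
def cfA_step4 (st : List String × Bool × Bool) (e : Int × String) : List String × Bool × Bool :=
  let sid := e.1
  let sp := e.2
  let nsp := if st.2.1 = false ∧ sp = "I-TERM" then PySem.List.pySetD st.1 sid "B-TERM" else st.1
  let term_start := PySem.Str.endswith sp "TERM"
  let nsp := if st.2.2 = false ∧ sp = "I-DEF" then PySem.List.pySetD nsp sid "B-DEF" else nsp
  let def_start := PySem.Str.endswith sp "DEF"
  (nsp, term_start, def_start)

-- one iteration of A's outer loop over zip(intent_preds, slot_preds)
def cfA_seq (acc : List Int × List (List String)) (p : Int × List String) : List Int × List (List String) :=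
  let intent_pred := p.1
  let slot_pred := p.2
  let new_slot_pred := slot_pred
  let new_intent_pred := intent_pred
  -- 1. [slot] Filter out term / definition only cases.
  let pred_counter := PySem.Dict.counter slot_pred
  let ed := (PySem.Dict.keys pred_counter).foldl
    (fun (st : Bool × Bool) c =>
      let st := if PySem.Str.endswith c "TERM" then (true, st.2) else st
      if PySem.Str.endswith c "DEF" then (st.1, true) else st)
    (false, false)
  let term_exist := ed.1
  let def_exist := ed.2
  let new_slot_pred := if ¬(term_exist = true ∧ def_exist = true) then slot_pred.map (fun _ => "O") else new_slot_pred
  -- 2. [intent] Change intent label if no term + def detected.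
  let new_intent_pred := if ¬(term_exist = true ∧ def_exist = true) then 0 else new_intent_pred
  -- 3. [slot] Replace UNK with O.
  let new_slot_pred := new_slot_pred.map (fun sp => if sp = "UNK" then "O" else sp)
  -- 4. Change I-TERM I-DEF starting cases.
  let temp_new_slot_pred := new_slot_pred
  let st := (PySem.List.enumerate temp_new_slot_pred).foldl cfA_step4 (new_slot_pred, false, false)
  (acc.1 ++ [new_intent_pred], acc.2 ++ [st.1])

def common_filters (intent_preds : List Int) (slot_preds : List (List String)) : List Int × List (List String) :=
  (intent_preds.zip slot_preds).foldl cfA_seq ([], [])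

-- ===== PORT B =====
-- _category: 'T' for TERM-suffixed, 'D' for DEF-suffixed, 'O' otherwise
def cfB_cat (sp : String) : String :=
  if PySem.Str.endswith sp "TERM" then "T"
  else if PySem.Str.endswith sp "DEF" then "D"
  else "O"

-- `runs[-1][1].append(sp)` when the last run has key k, else `runs.append((k, [sp]))`
def cfB_addTok (runs : List (String × List String)) (k : String) (sp : String) :
    List (String × List String) :=
  match runs with
  | [] => [(k, [sp])]
  | [(k', g)] => if k' = k then [(k', g ++ [sp])] else [(k', g), (k, [sp])]
  | p :: rest => p :: cfB_addTok rest k sp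

-- `g[0] = "B-TERM"` / `g[0] = "B-DEF"`; every run built by cfB_addTok is nonempty, [] is unreachable
def cfB_patchRun (k : String) (g : List String) : List String :=
  match g with
  | [] => []
  | h :: t =>
    (if k = "T" ∧ h = "I-TERM" then "B-TERM"
     else if k = "D" ∧ h = "I-DEF" then "B-DEF" else h) :: t

-- one iteration of B's outer loop
def cfB_seq (acc : List Int × List (List String)) (p : Int × List String) : List Int × List (List String) :=
  let cleaned := p.2.map (fun sp => if sp = "UNK" then "O" else sp)
  let runs := cleaned.foldl (fun rs sp => cfB_addTok rs (cfB_cat sp) sp) []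
  let keys := PySem.Set.ofList (runs.map Prod.fst)
  if keys.contains "T" && keys.contains "D" then
    let out := runs.foldl (fun o kg => o ++ cfB_patchRun kg.1 kg.2) []
    (acc.1 ++ [p.1], acc.2 ++ [out])
  else
    (acc.1 ++ [(0 : Int)], acc.2 ++ [List.replicate p.2.length "O"])

def common_filters_alt (intent_preds : List Int) (slot_preds : List (List String)) : List Int × List (List String) :=
  (intent_preds.zip slot_preds).foldl cfB_seq ([], [])

-- ===== PRECONDITION & SPEC =====
def Spec_common_filters (intent_preds : List Int) (slot_preds : List (List String)) (out : List Int × List (List String)) : Prop := out = common_filters_alt intent_preds slot_preds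
instance (intent_preds : List Int) (slot_preds : List (List String)) (out : List Int × List (List String)) : Decidable (Spec_common_filters intent_preds slot_preds out) := by unfold Spec_common_filters; infer_instance

-- ===== CLAIM (what is proved, stated in full; the proofs are below) =====
def Claim_equal_common_filters : Prop := ∀ (intent_preds : List Int) (slot_preds : List (List String)), Dom_common_filters intent_preds slot_preds → Spec_common_filters intent_preds slot_preds (common_filters intent_preds slot_preds)

-- ===== LEMMAS AND PROOFS =====

-- reference form of the repair: ts/ds say whether the previous (post-UNK) token ended in TERM/DEF
def pvFix (ts ds : Bool) : List String → List String
  | [] => []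
  | sp :: rest =>
    let cur := if ts = false ∧ sp = "I-TERM" then "B-TERM"
               else if ds = false ∧ sp = "I-DEF" then "B-DEF" else sp
    cur :: pvFix (PySem.Str.endswith sp "TERM") (PySem.Str.endswith sp "DEF") rest

-- span-style reference form of B's run grouping
def pvGroups : List String → List (String × List String)
  | [] => []
  | x :: xs =>
    (cfB_cat x, x :: xs.takeWhile (fun y => cfB_cat y == cfB_cat x)) ::
    pvGroups (xs.dropWhile (fun y => cfB_cat y == cfB_cat x))
  termination_by l => l.length
  decreasing_by
    have := List.length_dropWhile_le (p := fun y => cfB_cat y == cfB_cat x) (l := xs)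
    simp; omega

-- A's term_exist/def_exist fold computes a pair of 'any's
lemma pvExistFold (l : List String) (b1 b2 : Bool) :
    l.foldl
      (fun (st : Bool × Bool) c =>
        let st := if PySem.Str.endswith c "TERM" then (true, st.2) else st
        if PySem.Str.endswith c "DEF" then (st.1, true) else st)
      (b1, b2)
    = (b1 || l.any (fun c => PySem.Str.endswith c "TERM"),
       b2 || l.any (fun c => PySem.Str.endswith c "DEF")) := by
  induction l generalizing b1 b2 with
  | nil => simp
  | cons c l ih =>
    simp only [List.foldl_cons, List.any_cons]
    by_cases hT : PySem.Str.endswith c "TERM" = true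
    · by_cases hD : PySem.Str.endswith c "DEF" = true
      · rw [if_pos hT, if_pos hD, ih, hT, hD]; simp
      · rw [if_pos hT, if_neg hD, ih, hT, Bool.eq_false_iff.mpr hD]; simp
    · by_cases hD : PySem.Str.endswith c "DEF" = true
      · rw [if_neg hT, if_pos hD, ih, hD, Bool.eq_false_iff.mpr hT]; simp
      · rw [if_neg hT, if_neg hD, ih, Bool.eq_false_iff.mpr hT, Bool.eq_false_iff.mpr hD]; simp

-- 'any' over the deduplicated key list equals 'any' over the list itself
lemma pvAnySet (l : List String) (p : String → Bool) : (PySem.Set.ofList l).any p = l.any p := by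
  rcases h : l.any p with _ | _
  · simp only [List.any_eq_false] at h ⊢
    intro x hx; exact h x ((PySem.Set.mem_ofList l x).mp hx)
  · simp only [List.any_eq_true] at h ⊢
    obtain ⟨x, hx, hp⟩ := h; exact ⟨x, (PySem.Set.mem_ofList l x).mpr hx, hp⟩

-- A's step-4 fold, positioned after an already-processed prefix, computes pvFix on the suffix
lemma pvStepA (temp : List String) (pref : List String) (ts ds : Bool) :
    ((PySem.List.enumerate temp (pref.length : Int)).foldl cfA_step4 (pref ++ temp, ts, ds)).1
    = pref ++ pvFix ts ds temp := by
  induction temp generalizing pref ts ds with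
  | nil => simp [pvFix]
  | cons sp rest ih =>
    rw [PySem.List.enumerate_cons, List.foldl_cons]
    have hset : ∀ v : String, PySem.List.pySetD (pref ++ sp :: rest) ((pref.length : Nat) : Int) v
        = pref ++ v :: rest := by
      intro v; rw [PySem.List.pySetD_natCast]; simp
    by_cases h1 : ts = false ∧ sp = "I-TERM"
    · obtain ⟨hts, hsp⟩ := h1; subst hsp; subst hts
      have e1 : PySem.Str.endswith "I-TERM" "TERM" = true := by decide
      have e2 : PySem.Str.endswith "I-TERM" "DEF" = false := by decide
      have H := ih (pref ++ ["B-TERM"]) true false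
      rw [List.append_assoc, List.singleton_append] at H
      simp only [List.length_append, List.length_singleton, Nat.cast_add, Nat.cast_one] at H
      have hc2 : ¬(ds = false ∧ "I-TERM" = "I-DEF") := fun h => absurd h.2 (by decide)
      simp only [cfA_step4, e1, e2, if_neg hc2, hset, and_self, if_true]
      simp only [pvFix, e1, e2, and_self, if_true]
      rw [H]; simp
    · by_cases h2 : ds = false ∧ sp = "I-DEF"
      · obtain ⟨hds, hsp⟩ := h2; subst hsp; subst hds
        have e1 : PySem.Str.endswith "I-DEF" "TERM" = false := by decide
        have e2 : PySem.Str.endswith "I-DEF" "DEF" = true := by decide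
        have H := ih (pref ++ ["B-DEF"]) false true
        rw [List.append_assoc, List.singleton_append] at H
        simp only [List.length_append, List.length_singleton, Nat.cast_add, Nat.cast_one] at H
        simp only [cfA_step4, e1, e2, if_neg h1, hset, and_self, if_true]
        simp only [pvFix, if_neg h1, e1, e2, and_self, if_true]
        rw [H]; simp
      · have H := ih (pref ++ [sp]) (PySem.Str.endswith sp "TERM") (PySem.Str.endswith sp "DEF")
        rw [List.append_assoc, List.singleton_append] at H
        simp only [List.length_append, List.length_singleton, Nat.cast_add, Nat.cast_one] at H
        simp only [cfA_step4, if_neg h1, if_neg h2, H]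
        simp only [pvFix, if_neg h1, if_neg h2]
        simp

-- the repair pass leaves an all-"O" list unchanged
lemma pvFixConstO (l : List String) (ts ds : Bool) :
    pvFix ts ds (l.map (fun _ => "O")) = l.map (fun _ => "O") := by
  induction l generalizing ts ds with
  | nil => simp [pvFix]
  | cons x l ih =>
    simp only [List.map_cons, pvFix]
    rw [if_neg (by rintro ⟨_, h⟩; exact absurd h (by decide)),
        if_neg (by rintro ⟨_, h⟩; exact absurd h (by decide))]
    rw [ih]

-- a string cannot end with both "TERM" and "DEF"
lemma pvTermNotDef (s : String) (h : PySem.Str.endswith s "TERM" = true) :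
    PySem.Str.endswith s "DEF" = false := by
  by_contra hd
  rw [Bool.not_eq_false] at hd
  rw [PySem.Str.endswith_eq, PySem.Chars.endswith_iff] at h hd
  rcases List.suffix_or_suffix_of_suffix hd h with hs | hs
  · exact absurd hs (by decide)
  · exact absurd hs (by decide)

lemma pvCatTERM (s : String) : PySem.Str.endswith s "TERM" = (cfB_cat s == "T") := by
  unfold cfB_cat
  split_ifs with h1 h2
  · rw [h1]; decide
  · rw [Bool.not_eq_true] at h1; rw [h1]; decide
  · rw [Bool.not_eq_true] at h1; rw [h1]; decide

lemma pvCatDEF (s : String) : PySem.Str.endswith s "DEF" = (cfB_cat s == "D") := by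
  unfold cfB_cat
  split_ifs with h1 h2
  · rw [pvTermNotDef s h1]; decide
  · rw [h2]; decide
  · rw [Bool.not_eq_true] at h2; rw [h2]; decide

-- appending a token into the last run, written against an exposed last run
lemma pvAddTokLast (acc : List (String × List String)) (k' k : String) (g : List String) (sp : String) :
    cfB_addTok (acc ++ [(k', g)]) k sp
    = if k' = k then acc ++ [(k', g ++ [sp])] else acc ++ [(k', g), (k, [sp])] := by
  induction acc with
  | nil => rfl
  | cons p acc ih =>
    rcases acc with _ | ⟨q, acc⟩
    · simp only [List.nil_append, List.cons_append, cfB_addTok]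
      split_ifs <;> rfl
    · simp only [List.cons_append, cfB_addTok] at ih ⊢
      rw [ih]
      split_ifs <;> rfl

-- B's grouping fold, with an open last run, consumes the matching prefix and then groups the rest
lemma pvGrpConsume (l : List String) (acc : List (String × List String)) (k : String) (g : List String) :
    l.foldl (fun rs sp => cfB_addTok rs (cfB_cat sp) sp) (acc ++ [(k, g)])
    = acc ++ (k, g ++ l.takeWhile (fun y => cfB_cat y == k))
          :: pvGroups (l.dropWhile (fun y => cfB_cat y == k)) := by
  induction l generalizing acc k g with
  | nil => simp [pvGroups]
  | cons x xs ih =>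
    simp only [List.foldl_cons]
    by_cases h : cfB_cat x = k
    · rw [pvAddTokLast, if_pos h.symm, ih]
      rw [List.takeWhile_cons_of_pos (by simp [h]), List.dropWhile_cons_of_pos (by simp [h])]
      simp
    · rw [pvAddTokLast, if_neg (fun e => h e.symm)]
      have : acc ++ [(k, g), (cfB_cat x, [x])] = (acc ++ [(k, g)]) ++ [(cfB_cat x, [x])] := by simp
      rw [this, ih]
      rw [List.takeWhile_cons_of_neg (by simp [h]), List.dropWhile_cons_of_neg (by simp [h])]
      rw [pvGroups]
      simp

lemma pvGrpEq (l : List String) :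
    l.foldl (fun rs sp => cfB_addTok rs (cfB_cat sp) sp) [] = pvGroups l := by
  cases l with
  | nil => simp [pvGroups]
  | cons x xs =>
    have : cfB_addTok [] (cfB_cat x) x = [] ++ [(cfB_cat x, [x])] := rfl
    rw [List.foldl_cons, this, pvGrpConsume, pvGroups]
    simp

-- pvFix passes unchanged through a block whose tokens all have category k, keeping its state
lemma pvFixChunk (k : String) (g rest : List String) (hg : ∀ s ∈ g, cfB_cat s = k) :
    pvFix (k == "T") (k == "D") (g ++ rest) = g ++ pvFix (k == "T") (k == "D") rest := by
  induction g with
  | nil => simp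
  | cons s g ih =>
    have hs : cfB_cat s = k := hg s (by simp)
    simp only [List.cons_append, pvFix]
    rw [if_neg, if_neg, pvCatTERM, pvCatDEF, hs,
        ih (fun t ht => hg t (by simp [ht]))]
    · rintro ⟨hds, hsp⟩
      have : cfB_cat s = "D" := by rw [hsp]; decide
      rw [this] at hs; rw [← hs] at hds; exact absurd hds (by decide)
    · rintro ⟨hts, hsp⟩
      have : cfB_cat s = "T" := by rw [hsp]; decide
      rw [this] at hs; rw [← hs] at hts; exact absurd hts (by decide)

-- pvFix across one whole run equals patching the run's head and moving to the run's state
lemma pvFixRun (k x : String) (t rest : List String) (ts ds : Bool)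
    (hx : cfB_cat x = k) (ht : ∀ s ∈ t, cfB_cat s = k)
    (hts : k = "T" → ts = false) (hds : k = "D" → ds = false) :
    pvFix ts ds ((x :: t) ++ rest)
    = cfB_patchRun k (x :: t) ++ pvFix (k == "T") (k == "D") rest := by
  have hhead :
      (if ts = false ∧ x = "I-TERM" then "B-TERM"
       else if ds = false ∧ x = "I-DEF" then "B-DEF" else x)
      = (if k = "T" ∧ x = "I-TERM" then "B-TERM"
         else if k = "D" ∧ x = "I-DEF" then "B-DEF" else x) := by
    by_cases e1 : x = "I-TERM"
    · have hk : k = "T" := by rw [← hx, e1]; decide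
      rw [if_pos ⟨hts hk, e1⟩, if_pos ⟨hk, e1⟩]
    · have n1 : ¬(ts = false ∧ x = "I-TERM") := fun h => e1 h.2
      have n1' : ¬(k = "T" ∧ x = "I-TERM") := fun h => e1 h.2
      by_cases e2 : x = "I-DEF"
      · have hk : k = "D" := by rw [← hx, e2]; decide
        rw [if_neg n1, if_neg n1', if_pos ⟨hds hk, e2⟩, if_pos ⟨hk, e2⟩]
      · have n2 : ¬(ds = false ∧ x = "I-DEF") := fun h => e2 h.2
        have n2' : ¬(k = "D" ∧ x = "I-DEF") := fun h => e2 h.2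
        rw [if_neg n1, if_neg n1', if_neg n2, if_neg n2']
  simp only [List.cons_append, pvFix, cfB_patchRun, hhead]
  rw [pvCatTERM, pvCatDEF, hx, pvFixChunk k t rest ht]

-- concatenating the patched runs computes the repair pass pvFix
lemma pvFixGroups (l : List String) (ts ds : Bool)
    (hc : ∀ x, l.head? = some x →
      (cfB_cat x = "T" → ts = false) ∧ (cfB_cat x = "D" → ds = false)) :
    (pvGroups l).flatMap (fun kg => cfB_patchRun kg.1 kg.2) = pvFix ts ds l := by
  induction hn : l.length using Nat.strong_induction_on generalizing l ts ds with
  | _ n ihn =>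
    cases l with
    | nil => subst hn; simp [pvGroups, pvFix]
    | cons x xs =>
      subst hn
      rw [pvGroups]
      simp only [List.flatMap_cons]
      set p := fun y => cfB_cat y == cfB_cat x with hp
      have hsplit : x :: xs = (x :: xs.takeWhile p) ++ xs.dropWhile p := by
        simp [List.takeWhile_append_dropWhile]
      have hdw : (xs.dropWhile p).length < (x :: xs).length := by
        have := List.length_dropWhile_le (p := p) (l := xs); simp; omega
      have hrec : (pvGroups (xs.dropWhile p)).flatMap (fun kg => cfB_patchRun kg.1 kg.2)
          = pvFix (cfB_cat x == "T") (cfB_cat x == "D") (xs.dropWhile p) := by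
        apply ihn _ hdw
        · intro y hy
          have hpy : p y = false := by
            have := List.head?_dropWhile_not p xs
            rw [hy] at this; simpa using this
          have hne : cfB_cat y ≠ cfB_cat x := by
            intro e; rw [hp] at hpy; simp [e] at hpy
          constructor
          · intro hT; rw [hT] at hne
            rcases h : cfB_cat x == "T" with _ | _
            · rfl
            · exact absurd (by rw [eq_comm]; exact (beq_iff_eq.mp h)) hne
          · intro hD; rw [hD] at hne
            rcases h : cfB_cat x == "D" with _ | _
            · rfl
            · exact absurd (by rw [eq_comm]; exact (beq_iff_eq.mp h)) hne
        · rfl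
      conv_rhs => rw [hsplit]
      rw [pvFixRun (cfB_cat x) x (xs.takeWhile p) (xs.dropWhile p) ts ds rfl
        (fun s hs => by
          have h := List.mem_takeWhile_imp hs
          simp only [hp] at h
          exact beq_iff_eq.mp h)
        (fun h => (hc x rfl).1 h) (fun h => (hc x rfl).2 h)]
      rw [hrec]

-- a category K occurs among the run keys iff some token has category K
lemma pvKeysAny (l : List String) (K : String) :
    (pvGroups l).any (fun kg => kg.1 == K) = l.any (fun s => cfB_cat s == K) := by
  induction hn : l.length using Nat.strong_induction_on generalizing l with
  | _ n ihn =>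
    cases l with
    | nil => subst hn; simp [pvGroups]
    | cons x xs =>
      subst hn
      rw [pvGroups]
      set p := fun y => cfB_cat y == cfB_cat x with hp
      have hdw : (xs.dropWhile p).length < (x :: xs).length := by
        have := List.length_dropWhile_le (p := p) (l := xs); simp; omega
      have hrec := ihn _ hdw (xs.dropWhile p) rfl
      simp only [List.any_cons, hrec]
      conv_rhs => rw [show xs = xs.takeWhile p ++ xs.dropWhile p from (List.takeWhile_append_dropWhile).symm]
      rw [List.any_append]
      rcases hx : cfB_cat x == K with _ | _
      · have htw : (xs.takeWhile p).any (fun s => cfB_cat s == K) = false := by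
          rw [List.any_eq_false]
          intro s hs
          have h := List.mem_takeWhile_imp hs
          simp only [hp] at h
          have he : cfB_cat s = cfB_cat x := beq_iff_eq.mp h
          rw [he]; simp [hx]
        simp [htw]
      · simp

-- set membership test over the run keys as an 'any'
lemma pvContainsOfList (m : List String) (K : String) :
    (PySem.Set.ofList m).contains K = m.any (fun x => x == K) := by
  rcases h : m.any (fun x => x == K) with _ | _
  · refine Bool.eq_false_iff.mpr (fun hc => ?_)
    have hK : K ∈ m := (PySem.Set.mem_ofList m K).mp (List.contains_iff_mem.mp hc)
    rw [List.any_eq_false] at h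
    have hKK := h K hK
    simp at hKK
  · rw [List.any_eq_true] at h
    obtain ⟨x, hx, hxK⟩ := h
    have hxe : x = K := beq_iff_eq.mp hxK
    subst hxe
    exact List.contains_iff_mem.mpr ((PySem.Set.mem_ofList m x).mpr hx)

-- cleaning UNK→O changes no token's category
lemma pvCleanCatT (l : List String) :
    (l.map (fun sp => if sp = "UNK" then "O" else sp)).any (fun s => cfB_cat s == "T")
    = l.any (fun s => PySem.Str.endswith s "TERM") := by
  rw [List.any_map]
  refine List.any_congr rfl (fun s => ?_)
  show (cfB_cat (if s = "UNK" then "O" else s) == "T") = PySem.Str.endswith s "TERM"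
  by_cases h : s = "UNK"
  · subst h; decide
  · rw [if_neg h, pvCatTERM]

lemma pvCleanCatD (l : List String) :
    (l.map (fun sp => if sp = "UNK" then "O" else sp)).any (fun s => cfB_cat s == "D")
    = l.any (fun s => PySem.Str.endswith s "DEF") := by
  rw [List.any_map]
  refine List.any_congr rfl (fun s => ?_)
  show (cfB_cat (if s = "UNK" then "O" else s) == "D") = PySem.Str.endswith s "DEF"
  by_cases h : s = "UNK"
  · subst h; decide
  · rw [if_neg h, pvCatDEF]

-- one iteration of the two outer loops agrees
lemma pvSeq (acc : List Int × List (List String)) (p : Int × List String) :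
    cfA_seq acc p = cfB_seq acc p := by
  obtain ⟨ip, sp⟩ := p
  simp only [cfA_seq, cfB_seq, PySem.Dict.keys_counter, pvAnySet, pvExistFold, Bool.false_or]
  rw [pvGrpEq]
  have hX : ∀ K : String,
      (PySem.Set.ofList ((pvGroups (sp.map fun s => if s = "UNK" then "O" else s)).map Prod.fst)).contains K
      = (sp.map fun s => if s = "UNK" then "O" else s).any (fun s => cfB_cat s == K) := by
    intro K
    rw [pvContainsOfList, List.any_map]
    exact (List.any_congr rfl (fun kg => rfl)).trans (pvKeysAny _ K)
  have hT := (hX "T").trans (pvCleanCatT sp)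
  have hD := (hX "D").trans (pvCleanCatD sp)
  rw [hT, hD]
  by_cases hb : sp.any (fun c => PySem.Str.endswith c "TERM") = true ∧
      sp.any (fun c => PySem.Str.endswith c "DEF") = true
  · rw [if_neg (not_not_intro hb), if_neg (not_not_intro hb),
        if_pos (by rw [hb.1, hb.2]; rfl)]
    have hA := pvStepA (sp.map (fun s => if s = "UNK" then "O" else s)) [] false false
    simp only [List.length_nil, Nat.cast_zero, List.nil_append] at hA
    rw [hA, PySem.List.foldl_append_eq_flatMap,
        pvFixGroups _ false false (fun x _ => ⟨fun _ => rfl, fun _ => rfl⟩)]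
    simp
  · rw [if_pos hb, if_pos hb]
    rw [if_neg (by
      rcases Decidable.not_and_iff_not_or_not.mp hb with h | h
      · rw [Bool.eq_false_iff.mpr h]; simp
      · rw [Bool.eq_false_iff.mpr h]; simp)]
    have hmap : (sp.map (fun _ => "O")).map (fun s => if s = "UNK" then "O" else s)
        = sp.map (fun _ => "O") := by
      rw [List.map_map]; apply List.map_congr_left; intro x _; simp
    rw [hmap]
    have hA := pvStepA (sp.map (fun _ => "O")) [] false false
    simp only [List.length_nil, Nat.cast_zero, List.nil_append] at hA
    rw [hA, pvFixConstO]
    simp [List.map_const']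

lemma pvOuter (l : List (Int × List String)) (acc : List Int × List (List String)) :
    l.foldl cfA_seq acc = l.foldl cfB_seq acc := by
  induction l generalizing acc with
  | nil => rfl
  | cons p l ih => simp only [List.foldl_cons, pvSeq, ih]

-- ===== VERDICT (by name: the statement is the Claim_ definition above) =====
theorem common_filters_spec : Claim_equal_common_filters := by
  intro intent_preds slot_preds _
  unfold Spec_common_filters common_filters common_filters_alt
  exact pvOuter _ _
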